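-- pv_equiv track=rewrite | github.com/DanielMagen/University-exercises | Into_to_CS_2017_2018/ex4/hangman.py | filter_words_list
-- ===== SOURCE A (Python) =====
-- def filter_words_list(words, pattern, wrong_guess_lst):
--     """
--     this function receives a list of words, a pattern and a guess list
--     it returns all the words in the words list that
--     do not contain any letter that is in the guess list,
--     and that also matches the given pattern
--     """
--
--     words_that_match = []
--
--     for word in words:
--         word_matches = True
--
--         if len(word) != len(pattern):
--             continue
--
--         for i, character in enumerate(word):
--             if pattern[i] != '_':
--                 if pattern[i] != character or character in wrong_guess_lst:
--                     word_matches = False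
--                     break
--
--         if word_matches:
--             words_that_match.append(word)
--
--     return words_that_match
-- ===== SOURCE B (Python) =====
-- def filter_words_list(words, pattern, wrong_guess_lst):
--     # Hoist the wrong-guess analysis out of the per-word scan: if any revealed
--     # pattern letter was already guessed wrong, nothing can match.
--     wrong = set(wrong_guess_lst)
--     revealed = [ch for ch in pattern if ch != '_']
--     if any(ch in wrong for ch in revealed):
--         return []
--     return [word for word in words
--             if len(word) == len(pattern)
--             and all(p == '_' or p == c for p, c in zip(pattern, word))]
-- ===== Notes on version B (the rewrite author's own statement) =====
-- stated objective: simpler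
-- what changed: B hoists the wrong-guess analysis out of the per-word loop (if any revealed pattern letter is a wrong guess it returns [] immediately) and replaces A's index-based inner scan with a zip of pattern and word checked by a single all().
import Mathlib
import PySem

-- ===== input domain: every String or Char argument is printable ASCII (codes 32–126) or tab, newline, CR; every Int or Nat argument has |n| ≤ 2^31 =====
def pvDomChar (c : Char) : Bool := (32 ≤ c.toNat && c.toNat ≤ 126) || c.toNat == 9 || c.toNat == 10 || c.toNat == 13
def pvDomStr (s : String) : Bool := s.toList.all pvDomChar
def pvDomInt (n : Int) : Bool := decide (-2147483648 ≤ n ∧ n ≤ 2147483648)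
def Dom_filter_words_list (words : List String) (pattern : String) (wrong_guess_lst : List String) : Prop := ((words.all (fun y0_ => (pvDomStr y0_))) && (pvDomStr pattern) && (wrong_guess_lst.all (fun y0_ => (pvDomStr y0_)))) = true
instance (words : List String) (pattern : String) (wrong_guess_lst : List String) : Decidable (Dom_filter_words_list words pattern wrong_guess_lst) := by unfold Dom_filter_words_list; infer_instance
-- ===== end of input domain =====

-- B replaces A's per-word indexed scan by a hoisted wrong-guess check on the revealed
-- pattern letters (returning [] at once if one was guessed wrong) plus a zip-based
-- pattern comparison; objective: simpler.

-- ===== PORT A =====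
-- inner loop 'for i, character in enumerate(word)'; i counts up, pattern[i] via pyGet?.
-- The 'none' case is unreachable: A only runs the loop when len(word) = len(pattern).
def pvAInner (pat : List Char) (wrong : List String) : List Char → Int → Bool
  | [], _ => true
  | c :: rest, i =>
    match PySem.List.pyGet? pat i with
    | none => true
    | some p =>
      if p ≠ '_' then
        if p ≠ c || wrong.contains (String.singleton c) then false
        else pvAInner pat wrong rest (i + 1)
      else pvAInner pat wrong rest (i + 1)

def filter_words_list (words : List String) (pattern : String) (wrong_guess_lst : List String) : List String :=
  words.foldl (fun acc word =>
    if word.toList.length ≠ pattern.toList.length then acc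
    else if pvAInner pattern.toList wrong_guess_lst word.toList 0 then acc ++ [word]
    else acc) []

-- ===== PORT B =====
def filter_words_list_alt (words : List String) (pattern : String) (wrong_guess_lst : List String) : List String :=
  let wrong := PySem.Set.ofList wrong_guess_lst
  let revealed := pattern.toList.filter (fun ch => ch ≠ '_')
  if revealed.any (fun ch => PySem.Set.contains wrong (String.singleton ch)) then []
  else words.filter (fun word =>
    word.toList.length == pattern.toList.length &&
    (pattern.toList.zip word.toList).all (fun pc => pc.1 == '_' || pc.1 == pc.2))

-- ===== PRECONDITION & SPEC =====
def Spec_filter_words_list (words : List String) (pattern : String) (wrong_guess_lst : List String) (out : List String) : Prop := out = filter_words_list_alt words pattern wrong_guess_lst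
instance (words : List String) (pattern : String) (wrong_guess_lst : List String) (out : List String) : Decidable (Spec_filter_words_list words pattern wrong_guess_lst out) := by unfold Spec_filter_words_list; infer_instance

-- ===== CLAIM (what is proved, stated in full; the proofs are below) =====
def Claim_equal_filter_words_list : Prop := ∀ (words : List String) (pattern : String) (wrong_guess_lst : List String), Dom_filter_words_list words pattern wrong_guess_lst → Spec_filter_words_list words pattern wrong_guess_lst (filter_words_list words pattern wrong_guess_lst)

-- ===== LEMMAS AND PROOFS =====

-- structural (zip-style) view of A's inner loop, used only by the proofs
def pvZ (wrong : List String) : List Char → List Char → Bool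
  | p :: s, c :: w =>
    if p ≠ '_' then
      if p ≠ c || wrong.contains (String.singleton c) then false
      else pvZ wrong s w
    else pvZ wrong s w
  | _, _ => true

theorem pvAInner_eq_pvZ (wrong : List String) :
    ∀ (w pre s : List Char), w.length = s.length →
      pvAInner (pre ++ s) wrong w (pre.length : Int) = pvZ wrong s w := by
  intro w
  induction w with
  | nil => intro pre s h; cases s with
    | nil => simp [pvAInner, pvZ]
    | cons p s' => simp at h
  | cons c w' ih =>
    intro pre s h
    cases s with
    | nil => simp at h
    | cons p s' =>
      have hget : PySem.List.pyGet? (pre ++ p :: s') (pre.length : Int) = some p := by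
        simp
      have hrec : pvAInner (pre ++ p :: s') wrong w' ((pre.length : Int) + 1)
          = pvZ wrong s' w' := by
        have h' : w'.length = s'.length := by simpa using h
        have := ih (pre ++ [p]) s' h'
        simpa [List.append_assoc, Int.add_comm] using this
      simp only [pvAInner, hget, pvZ]
      split_ifs with h1 h2 <;> simp [hrec]
  
theorem pvZ_of_no_bad (wrong : List String) :
    ∀ (s w : List Char),
      (∀ p ∈ s, p ≠ '_' → String.singleton p ∉ wrong) →
      pvZ wrong s w = (s.zip w).all (fun pc => pc.1 == '_' || pc.1 == pc.2) := by
  intro s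
  induction s with
  | nil => intro w _; cases w <;> simp [pvZ]
  | cons p s' ih =>
    intro w hno
    cases w with
    | nil => simp [pvZ]
    | cons c w' =>
      have hrest : ∀ q ∈ s', q ≠ '_' → String.singleton q ∉ wrong := by
        intro q hq; exact hno q (List.mem_cons_of_mem _ hq)
      by_cases hp : p = '_'
      · subst hp; simp [pvZ, ih w' hrest]
      · have hc : String.singleton p ∉ wrong := hno p (List.mem_cons_self ..) hp
        by_cases hpc : p = c
        · subst hpc; simp [pvZ, hp, hc, ih w' hrest]
        · simp [pvZ, hp, hpc]

theorem pvZ_of_bad (wrong : List String) :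
    ∀ (s w : List Char), s.length = w.length →
      (∃ p ∈ s, p ≠ '_' ∧ String.singleton p ∈ wrong) →
      pvZ wrong s w = false := by
  intro s
  induction s with
  | nil => intro w _ hbad; simp at hbad
  | cons p s' ih =>
    intro w hlen hbad
    cases w with
    | nil => simp at hlen
    | cons c w' =>
      have hlen' : s'.length = w'.length := by simpa using hlen
      obtain ⟨q, hq, hq1, hq2⟩ := hbad
      rcases List.mem_cons.mp hq with hq' | hq'
      · subst hq'
        by_cases hpc : q = c
        · subst hpc; simp [pvZ, hq1, hq2]
        · simp [pvZ, hq1, hpc]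
      · by_cases hp : p = '_'
        · subst hp; simpa [pvZ] using ih w' hlen' ⟨q, hq', hq1, hq2⟩
        · by_cases hpc : p = c
          · subst hpc
            by_cases hc : String.singleton p ∈ wrong
            · simp [pvZ, hp, hc]
            · simp [pvZ, hp, hc, ih w' hlen' ⟨q, hq', hq1, hq2⟩]
          · simp [pvZ, hp, hpc]

theorem filter_words_list_spec : Claim_equal_filter_words_list := by
  intro words pattern wrong _
  unfold Spec_filter_words_list filter_words_list filter_words_list_alt
  have hfold : words.foldl (fun acc word =>
      if word.toList.length ≠ pattern.toList.length then acc
      else if pvAInner pattern.toList wrong word.toList 0 then acc ++ [word]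
      else acc) []
      = words.filter (fun word =>
          (word.toList.length == pattern.toList.length) &&
          pvAInner pattern.toList wrong word.toList 0) := by
    have hbody : (fun (acc : List String) word =>
        if word.toList.length ≠ pattern.toList.length then acc
        else if pvAInner pattern.toList wrong word.toList 0 then acc ++ [word]
        else acc)
        = (fun acc word =>
          if ((word.toList.length == pattern.toList.length) &&
              pvAInner pattern.toList wrong word.toList 0) then acc ++ [word] else acc) := by
      funext acc word
      by_cases h1 : word.toList.length = pattern.toList.length <;>
        by_cases h2 : pvAInner pattern.toList wrong word.toList 0 <;> simp [h1, h2]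
    rw [hbody, PySem.List.foldl_append_if_eq_filter]
    simp
  rw [hfold]
  have hinner : ∀ word : String, word.toList.length = pattern.toList.length →
      pvAInner pattern.toList wrong word.toList 0 = pvZ wrong pattern.toList word.toList := by
    intro word h
    simpa using pvAInner_eq_pvZ wrong word.toList [] pattern.toList h
  by_cases hbad : (pattern.toList.filter (fun ch => ch ≠ '_')).any
      (fun ch => PySem.Set.contains (PySem.Set.ofList wrong) (String.singleton ch))
  · -- some revealed letter is a wrong guess: both sides are []
    simp only [hbad, if_true]
    rw [List.filter_eq_nil_iff]
    intro word _
    simp only [Bool.and_eq_true, beq_iff_eq, not_and, Bool.not_eq_true]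
    intro h1
    obtain ⟨q, hqmem, hqc⟩ := List.any_eq_true.mp hbad
    obtain ⟨hqs, hq1⟩ := List.mem_filter.mp hqmem
    rw [hinner word h1]
    exact pvZ_of_bad wrong _ _ h1.symm
      ⟨q, hqs, by simpa using hq1,
        by simpa [PySem.Set.contains_iff, PySem.Set.mem_ofList] using hqc⟩
  · simp only [hbad]
    apply List.filter_congr
    intro word _
    by_cases h1 : word.toList.length = pattern.toList.length
    · have hno : ∀ p ∈ pattern.toList, p ≠ '_' → String.singleton p ∉ wrong := by
        intro p hp hp1 hmem
        exact hbad (List.any_eq_true.mpr ⟨p, List.mem_filter.mpr ⟨hp, by simpa using hp1⟩,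
          by simpa [PySem.Set.contains_iff, PySem.Set.mem_ofList] using hmem⟩)
      rw [hinner word h1, pvZ_of_no_bad wrong _ _ hno]
    · have h1f : (word.toList.length == pattern.toList.length) = false := by simpa using h1
      rw [h1f, Bool.false_and, Bool.false_and]
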